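-- pv_equiv track=rewrite | github.com/Sigmanificient/codewars | src/python/katas/py7kyu/nice_array.py | is_nice
-- ===== SOURCE A (Python) =====
-- from typing import List
--
-- def is_nice(arr: List[int]) -> bool:
--     t = sorted(set(arr))
--
--     if not t:
--         return False
--
--     ts = len(t)
--     for c, i in enumerate(t):
--         p = t[c - 1]
--         n = t[(c + 1) if (c + 1) < ts else c]
--
--         if (i + 1 != n) and ((i - 1) != p):
--             return False
--
--     return True
-- ===== SOURCE B (Python) =====
-- from typing import List
--
-- def is_nice(arr: List[int]) -> bool:
--     # Scan the sorted distinct values once, tracking the length of the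
--     # current maximal run of consecutive integers; any run of length 1
--     # means that element has no +-1 neighbour.
--     t = sorted(set(arr))
--     if not t:
--         return False
--     prev = t[0]
--     run = 1
--     for x in t[1:]:
--         if x == prev + 1:
--             run += 1
--         else:
--             if run == 1:
--                 return False
--             run = 1
--         prev = x
--     return run != 1
-- ===== Notes on version B (the rewrite author's own statement) =====
-- stated objective: alternative
-- what changed: Instead of testing both neighbours of every element via global indexed lookups (with a wrap-around t[-1] read), B scans the sorted distinct values once carrying a run-length accumulator of consecutive integers and rejects any maximal run of length 1.
import Mathlib
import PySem

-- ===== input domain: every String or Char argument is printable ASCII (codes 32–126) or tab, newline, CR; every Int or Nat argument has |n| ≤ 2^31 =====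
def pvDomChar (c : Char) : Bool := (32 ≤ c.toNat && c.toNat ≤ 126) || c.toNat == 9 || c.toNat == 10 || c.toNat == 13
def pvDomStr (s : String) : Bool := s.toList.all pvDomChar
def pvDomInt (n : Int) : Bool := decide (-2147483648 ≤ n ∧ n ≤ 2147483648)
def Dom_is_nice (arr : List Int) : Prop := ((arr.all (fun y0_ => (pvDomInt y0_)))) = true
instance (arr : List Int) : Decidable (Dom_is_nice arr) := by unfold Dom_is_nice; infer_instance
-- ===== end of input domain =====

-- B replaces A's per-element ±1 neighbour test (indexed lookups including a wrap-around t[-1] read)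
-- by a single run-length scan of the sorted distinct values; objective: alternative decomposition.


-- ===== PORT A =====
def is_nice (arr : List Int) : Bool :=
  let t := PySem.List.sorted (PySem.Set.ofList arr) (fun x => x) false
  if t = [] then false
  else
    let ts : Int := t.length
    (PySem.List.enumerate t).all (fun ci =>
      let c := ci.1
      let i := ci.2
      let p := PySem.List.pyGetD t (c - 1) 0
      let n := PySem.List.pyGetD t (if c + 1 < ts then c + 1 else c) 0
      !((i + 1 != n) && (i - 1 != p)))

-- ===== PORT B =====
-- run-length scan of Source B: prev = previous value, run = length of the current consecutive run
def isNiceRun (prev run : Int) : List Int → Bool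
  | [] => run != 1
  | x :: xs =>
      if x = prev + 1 then isNiceRun x (run + 1) xs
      else if run = 1 then false
      else isNiceRun x 1 xs

def is_nice_alt (arr : List Int) : Bool :=
  match PySem.List.sorted (PySem.Set.ofList arr) (fun x => x) false with
  | [] => false
  | x :: xs => isNiceRun x 1 xs

-- ===== PRECONDITION & SPEC =====
def Spec_is_nice (arr : List Int) (out : Bool) : Prop := out = is_nice_alt arr
instance (arr : List Int) (out : Bool) : Decidable (Spec_is_nice arr out) := by unfold Spec_is_nice; infer_instance

-- ===== CLAIM (what is proved, stated in full; the proofs are below) =====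
def Claim_equal_is_nice : Prop := ∀ (arr : List Int), Dom_is_nice arr → Spec_is_nice arr (is_nice arr)

-- ===== LEMMAS AND PROOFS =====

-- structural middle-man: nbA f l = "every element of l has a ±1 neighbour next to it in l,
-- where left-adjacency of the head is given by the flag f"
def nbA (f : Bool) : List Int → Bool
  | [] => true
  | [_] => f
  | y :: z :: rest => (f || (z == y + 1)) && nbA (z == y + 1) (z :: rest)

-- index formulation of the same predicate
def allAdj (f : Bool) (l : List Int) : Prop :=
  ∀ c, c < l.length →
    (f = true ∧ c = 0) ∨
    (c + 1 < l.length ∧ l.getD (c + 1) 0 = l.getD c 0 + 1) ∨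
    (0 < c ∧ l.getD (c - 1) 0 = l.getD c 0 - 1)

theorem isNiceRun_eq_nbA : ∀ (l : List Int) (prev run : Int), 1 ≤ run →
    isNiceRun prev run l = nbA (run != 1) (prev :: l)
  | [], prev, run, _ => by simp [isNiceRun, nbA]
  | x :: xs, prev, run, hrun => by
    by_cases hx : x = prev + 1
    · have e1 : (x == prev + 1) = true := beq_iff_eq.mpr hx
      have h1 : (run + 1 != 1) = true := by simp; omega
      calc isNiceRun prev run (x :: xs) = isNiceRun x (run + 1) xs := by
              simp [isNiceRun, hx]
        _ = nbA (run + 1 != 1) (x :: xs) := isNiceRun_eq_nbA xs x (run + 1) (by omega)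
        _ = nbA (run != 1) (prev :: x :: xs) := by rw [nbA, e1, h1]; simp
    · have e1 : (x == prev + 1) = false := by simp [hx]
      by_cases hr : run = 1
      · have h2 : (run != 1) = false := by simp [hr]
        rw [nbA, e1, h2]
        simp [isNiceRun, hx, hr]
      · have h2 : (run != 1) = true := by simp [hr]
        calc isNiceRun prev run (x :: xs) = isNiceRun x 1 xs := by
              simp [isNiceRun, hx, hr]
          _ = nbA ((1 : Int) != 1) (x :: xs) := isNiceRun_eq_nbA xs x 1 le_rfl
          _ = nbA (run != 1) (prev :: x :: xs) := by
              rw [nbA, e1, h2]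
              norm_num

theorem allAdj_cons2 (f : Bool) (y z : Int) (rest : List Int) :
    allAdj f (y :: z :: rest) ↔ ((f = true ∨ z = y + 1) ∧ allAdj (z == y + 1) (z :: rest)) := by
  constructor
  · intro h
    constructor
    · have h0 := h 0 (by simp)
      simp only [List.getD_cons_succ, List.getD_cons_zero, List.length_cons] at h0
      rcases h0 with ⟨hf, _⟩ | ⟨_, he⟩ | ⟨hlt, _⟩
      · exact Or.inl hf
      · exact Or.inr he
      · omega
    · intro c hc
      simp only [List.length_cons] at hc
      cases c with
      | zero =>
        have h1 := h (0 + 1) (by simp)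
        simp only [List.getD_cons_succ, List.getD_cons_zero, List.length_cons,
          Nat.add_sub_cancel] at h1 ⊢
        rcases h1 with ⟨_, hz⟩ | ⟨ha, hb⟩ | ⟨_, hb⟩
        · omega
        · exact Or.inr (Or.inl ⟨by omega, by simpa using hb⟩)
        · exact Or.inl ⟨beq_iff_eq.mpr (by omega), by simp⟩
      | succ c' =>
        have h2 := h (c' + 2) (by simp; omega)
        simp only [List.getD_cons_succ, List.length_cons,
          Nat.add_sub_cancel] at h2 ⊢
        rcases h2 with ⟨_, hz⟩ | ⟨ha, hb⟩ | ⟨_, hb⟩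
        · omega
        · exact Or.inr (Or.inl ⟨by omega, hb⟩)
        · exact Or.inr (Or.inr ⟨by omega, by simpa using hb⟩)
  · rintro ⟨h0, h⟩ c hc
    simp only [List.length_cons] at hc
    cases c with
    | zero =>
      simp only [List.getD_cons_succ, List.getD_cons_zero, List.length_cons]
      rcases h0 with hf | he
      · exact Or.inl ⟨hf, by simp⟩
      · exact Or.inr (Or.inl ⟨by omega, he⟩)
    | succ c' =>
      cases c' with
      | zero =>
        have h1 := h 0 (by simp)
        simp only [List.getD_cons_succ, List.getD_cons_zero, List.length_cons,
          beq_iff_eq] at h1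
        simp only [List.getD_cons_succ, List.getD_cons_zero, List.length_cons,
          Nat.add_sub_cancel]
        rcases h1 with ⟨he, _⟩ | ⟨ha, hb⟩ | ⟨hl, _⟩
        · exact Or.inr (Or.inr ⟨by omega, by omega⟩)
        · exact Or.inr (Or.inl ⟨by omega, by simpa using hb⟩)
        · omega
      | succ c'' =>
        have h1 := h (c'' + 1) (by simp at hc ⊢; omega)
        simp only [List.getD_cons_succ, List.length_cons,
          beq_iff_eq, Nat.add_sub_cancel] at h1
        simp only [List.getD_cons_succ, List.length_cons,
          Nat.add_sub_cancel]
        rcases h1 with ⟨_, hz⟩ | ⟨ha, hb⟩ | ⟨hl, hb⟩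
        · omega
        · exact Or.inr (Or.inl ⟨by omega, hb⟩)
        · exact Or.inr (Or.inr ⟨by omega, by simpa using hb⟩)

theorem nbA_iff_allAdj (l : List Int) : ∀ f, (nbA f l = true ↔ allAdj f l) := by
  induction l with
  | nil => intro f; simp [nbA, allAdj]
  | cons y ys ih =>
    intro f
    cases ys with
    | nil =>
      constructor
      · intro hf c hc
        have hc0 : c = 0 := by simpa using hc
        refine Or.inl ⟨by simpa [nbA] using hf, hc0⟩
      · intro h
        rcases h 0 (by simp) with ⟨hf, _⟩ | ⟨hlt, _⟩ | ⟨hl, _⟩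
        · simpa [nbA] using hf
        · simp at hlt
        · omega
    | cons z rest =>
      rw [allAdj_cons2]
      simp only [nbA, Bool.and_eq_true, Bool.or_eq_true, beq_iff_eq, ih (z == y + 1)]

theorem forall_enumerate {α : Type} (xs : List α) (f : Int × α → Bool) :
    (∀ p ∈ PySem.List.enumerate xs, f p = true) ↔
      ∀ (k : Nat) (h : k < xs.length), f ((k : Int), xs[k]) = true := by
  constructor
  · intro h k hk
    exact h _ ((PySem.List.mem_enumerate_iff xs 0 _).mpr ⟨k, hk, by simp⟩)
  · rintro h p hp
    obtain ⟨k, hk, rfl⟩ := (PySem.List.mem_enumerate_iff xs 0 p).mp hp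
    simpa using h k hk

theorem isNice_all_iff_allAdj (t : List Int) (hne : t ≠ [])
    (hp : t.Pairwise (· < ·)) :
    ((PySem.List.enumerate t).all (fun ci =>
      let c := ci.1
      let i := ci.2
      let p := PySem.List.pyGetD t (c - 1) 0
      let n := PySem.List.pyGetD t (if c + 1 < (t.length : Int) then c + 1 else c) 0
      !((i + 1 != n) && (i - 1 != p))) = true) ↔ allAdj false t := by
  rw [List.all_eq_true, forall_enumerate]
  unfold allAdj
  have key : ∀ (k : Nat) (hk : k < t.length),
      (((!((t[k]'hk + 1 != PySem.List.pyGetD t (if (k : Int) + 1 < (t.length : Int) then (k : Int) + 1 else (k : Int)) 0) &&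
          (t[k]'hk - 1 != PySem.List.pyGetD t ((k : Int) - 1) 0))) = true) ↔
      ((k + 1 < t.length ∧ t.getD (k + 1) 0 = t.getD k 0 + 1) ∨
       (0 < k ∧ t.getD (k - 1) 0 = t.getD k 0 - 1))) := by
    intro k hk
    have hi : t[k] = t.getD k 0 := (List.getD_eq_getElem t 0 hk).symm
    have hn : PySem.List.pyGetD t (if (k : Int) + 1 < (t.length : Int) then (k : Int) + 1 else (k : Int)) 0
        = if k + 1 < t.length then t.getD (k + 1) 0 else t.getD k 0 := by
      by_cases hkl : k + 1 < t.length
      · have hc : ((k : Int) + 1 < (t.length : Int)) := by exact_mod_cast hkl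
        have he : (k : Int) + 1 = ((k + 1 : Nat) : Int) := by push_cast; ring
        rw [if_pos hc, if_pos hkl, he, PySem.List.pyGetD_natCast]
      · have hc : ¬((k : Int) + 1 < (t.length : Int)) := by exact_mod_cast hkl
        rw [if_neg hc, if_neg hkl, PySem.List.pyGetD_natCast]
    simp only [bne, Bool.not_and, Bool.not_not, Bool.or_eq_true, beq_iff_eq, hn, hi]
    by_cases hk0 : k = 0
    · subst hk0
      have hp1 : PySem.List.pyGetD t (((0 : Nat) : Int) - 1) 0 = t.getLast hne := by
        rw [show (((0 : Nat) : Int) - 1) = -1 by norm_num, PySem.List.pyGetD_neg_one t 0 hne]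
      have hlast : t.getLast hne = t.getD (t.length - 1) 0 := by
        rw [List.getLast_eq_getElem, List.getD_eq_getElem t 0 (by omega)]
      rw [hp1, hlast]
      by_cases hkl : 0 + 1 < t.length
      · have h01 : t.getD 0 0 < t.getD (t.length - 1) 0 := by
          rw [List.getD_eq_getElem t 0 (by omega), List.getD_eq_getElem t 0 (by omega)]
          exact List.pairwise_iff_getElem.mp hp 0 (t.length - 1) (by omega) (by omega) (by omega)
        rw [if_pos hkl]
        constructor
        · rintro (h | h)
          · exact Or.inl ⟨hkl, by omega⟩
          · omega
        · rintro (⟨_, h⟩ | ⟨h, _⟩)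
          · exact Or.inl (by omega)
          · omega
      · have hl1 : t.length = 1 := by
          have : t.length ≠ 0 := by simpa using hne
          omega
        rw [if_neg hkl]
        constructor
        · rintro (h | h)
          · omega
          · rw [hl1] at h
            simp only [show (1 : Nat) - 1 = 0 from rfl] at h
            omega
        · rintro (⟨h, _⟩ | ⟨h, _⟩) <;> omega
    · have hp1 : PySem.List.pyGetD t ((k : Int) - 1) 0 = t.getD (k - 1) 0 := by
        have he : (k : Int) - 1 = ((k - 1 : Nat) : Int) := by
          have : 1 ≤ k := by omega
          push_cast [this]; ring
        rw [he, PySem.List.pyGetD_natCast]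
      rw [hp1]
      by_cases hkl : k + 1 < t.length
      · rw [if_pos hkl]
        constructor
        · rintro (h | h)
          · exact Or.inl ⟨hkl, by omega⟩
          · exact Or.inr ⟨by omega, by omega⟩
        · rintro (⟨_, h⟩ | ⟨_, h⟩)
          · exact Or.inl (by omega)
          · exact Or.inr (by omega)
      · rw [if_neg hkl]
        constructor
        · rintro (h | h)
          · omega
          · exact Or.inr ⟨by omega, by omega⟩
        · rintro (⟨h, _⟩ | ⟨_, h⟩)
          · omega
          · exact Or.inr (by omega)
  constructor
  · intro h c hc
    exact Or.inr ((key c hc).mp (h c hc))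
  · intro h k hk
    refine (key k hk).mpr ?_
    rcases h k hk with ⟨hf, _⟩ | h' | h'
    · cases hf
    · exact Or.inl h'
    · exact Or.inr h'

-- ===== VERDICT (by name: the statement is the Claim_ definition above) =====
theorem is_nice_spec : Claim_equal_is_nice := by
  intro arr _
  show is_nice arr = is_nice_alt arr
  unfold is_nice is_nice_alt
  have hp := PySem.List.sorted_ofList_pairwise_lt (κ := Int) arr
  set t := PySem.List.sorted (PySem.Set.ofList arr) (fun x => x) false with ht
  clear_value t
  match t, hp with
  | [], _ => simp
  | x :: xs, hp =>
    have hne : (x :: xs : List Int) ≠ [] := by simp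
    rw [if_neg hne]
    show ((PySem.List.enumerate (x :: xs)).all fun ci =>
      let c := ci.1
      let i := ci.2
      let p := PySem.List.pyGetD (x :: xs) (c - 1) 0
      let n := PySem.List.pyGetD (x :: xs) (if c + 1 < ((x :: xs).length : Int) then c + 1 else c) 0
      !((i + 1 != n) && (i - 1 != p))) = isNiceRun x 1 xs
    rw [isNiceRun_eq_nbA xs x 1 le_rfl]
    have h1 : ((1 : Int) != 1) = false := by decide
    rw [h1]
    exact Bool.coe_iff_coe.mp ((isNice_all_iff_allAdj (x :: xs) hne hp).trans
      (nbA_iff_allAdj (x :: xs) false).symm)
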